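-- pv_equiv track=rewrite | github.com/pypi-data/pypi-mirror-401 | packages/delfin-complat/delfin_complat-1.0.8-py3-none-any.whl/delfin/occupier_auto.py | _ordered_candidates
-- ===== SOURCE A (Python) =====
-- from typing import Any, Dict, List, Optional
--
-- def _ordered_candidates(source: Dict[int, Any], preferred: Optional[int]) -> List[int]:
--     """Return sorted candidate keys, honoring a preferred index (int/str tolerant)."""
--     if not source:
--         return []
--
--     def _normalize(key: Any) -> Any:
--         try:
--             return int(key)
--         except Exception:  # noqa: BLE001
--             return key
--
--     ordered: List[Any] = []
--     if preferred is not None: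
--         for token in (preferred, str(preferred)):
--             if token in source and token not in ordered:
--                 ordered.append(token)
--
--     numeric: List[tuple[int, Any]] = []
--     non_numeric: List[tuple[str, Any]] = []
--     for key in source.keys():
--         norm = _normalize(key)
--         if isinstance(norm, int):
--             numeric.append((norm, key))
--         else:
--             non_numeric.append((str(norm), key))
--
--     for _, key in sorted(numeric, key=lambda pair: pair[0]):
--         if key not in ordered:
--             ordered.append(key)
--     for _, key in sorted(non_numeric, key=lambda pair: pair[0]):
--         if key not in ordered:
--             ordered.append(key)
--
--     return ordered
-- ===== SOURCE B (Python) =====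
-- from typing import Any, Dict, List, Optional
--
-- def _ordered_candidates(source: Dict[int, Any], preferred: Optional[int]) -> List[int]:
--     """Sorted keys; the preferred key (if present) moved to the front."""
--     keys = sorted(source)
--     if preferred is not None and preferred in source:
--         return [preferred] + [k for k in keys if k != preferred]
--     return keys
-- ===== Notes on version B (the rewrite author's own statement) =====
-- stated objective: simpler
-- what changed: Replaces A's partition into numeric/non-numeric buckets, two separate sorts and a dedup-append loop with repeated 'key not in ordered' list scans by one sorted() over the keys plus moving the preferred key to the front via a filter (keys are ints, so A's string token and non-numeric bucket are always empty).
import Mathlib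
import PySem

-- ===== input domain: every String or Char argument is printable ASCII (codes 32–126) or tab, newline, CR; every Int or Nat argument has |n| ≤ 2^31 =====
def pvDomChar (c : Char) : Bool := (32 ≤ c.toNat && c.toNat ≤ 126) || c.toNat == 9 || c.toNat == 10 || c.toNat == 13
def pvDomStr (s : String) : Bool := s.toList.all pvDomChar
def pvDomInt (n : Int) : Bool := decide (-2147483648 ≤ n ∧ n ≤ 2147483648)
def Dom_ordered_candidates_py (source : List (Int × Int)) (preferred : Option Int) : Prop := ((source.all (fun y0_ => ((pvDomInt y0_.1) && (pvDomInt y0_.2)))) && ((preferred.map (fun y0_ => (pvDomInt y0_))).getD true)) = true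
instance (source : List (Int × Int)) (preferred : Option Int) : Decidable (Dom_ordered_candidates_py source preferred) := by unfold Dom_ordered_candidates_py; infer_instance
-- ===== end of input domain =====

-- B replaces A's partition + two bucket sorts + dedup-append loop by one sort of the keys
-- plus a front-move of the preferred key (objective: simpler).
-- Keys are ints here, so A's str(preferred) token never matches and the non-numeric bucket is empty.

-- ===== PORT A =====
def ordered_candidates_py (source : List (Int × Int)) (preferred : Option Int) : List Int :=
  if source = [] then []
  else
    -- dict keys: distinct, in first-insertion order
    let keys := PySem.List.dedup (source.map Prod.fst)
    -- for token in (preferred, str(preferred)): keys are ints, so the string token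
    -- str(preferred) never equals a key and only the int token can be appended
    let ordered : List Int :=
      match preferred with
      | none => []
      | some p => if p ∈ keys then [p] else []
    -- _normalize(int k) = k and isinstance(k, int) holds, so numeric = [(k, k) for k in keys], non_numeric = []
    let numeric := keys.map (fun k => (k, k))
    let ordered :=
      (PySem.List.sorted numeric (fun pr => pr.1) false).foldl
        (fun acc pr => if pr.2 ∈ acc then acc else acc ++ [pr.2]) ordered
    -- the non_numeric loop iterates over the empty list
    ordered

-- ===== PORT B =====
def ordered_candidates_py_alt (source : List (Int × Int)) (preferred : Option Int) : List Int :=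
  let keys := PySem.List.sorted (PySem.List.dedup (source.map Prod.fst)) (fun x => x) false
  match preferred with
  | some p =>
      if p ∈ source.map Prod.fst then p :: keys.filter (fun k => k ≠ p) else keys
  | none => keys

-- ===== PRECONDITION & SPEC =====
def Spec_ordered_candidates_py (source : List (Int × Int)) (preferred : Option Int) (out : List Int) : Prop := out = ordered_candidates_py_alt source preferred
instance (source : List (Int × Int)) (preferred : Option Int) (out : List Int) : Decidable (Spec_ordered_candidates_py source preferred out) := by unfold Spec_ordered_candidates_py; infer_instance

-- ===== CLAIM (what is proved, stated in full; the proofs are below) =====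
def Claim_equal_ordered_candidates_py : Prop := ∀ (source : List (Int × Int)) (preferred : Option Int), Dom_ordered_candidates_py source preferred → Spec_ordered_candidates_py source preferred (ordered_candidates_py source preferred)

-- ===== LEMMAS AND PROOFS =====

-- A's dedup-append loop over a duplicate-free list appends exactly the elements not already present
theorem foldl_dedup_append (S : List Int) (init : List Int) (hS : S.Nodup) :
    S.foldl (fun acc k => if k ∈ acc then acc else acc ++ [k]) init
      = init ++ S.filter (fun k => k ∉ init) := by
  induction S generalizing init with
  | nil => simp
  | cons k S ih =>
    rcases List.nodup_cons.mp hS with ⟨hk, hS'⟩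
    by_cases h : k ∈ init
    · simp [List.foldl_cons, h, ih init hS']
    · rw [List.foldl_cons, if_neg h, ih (init ++ [k]) hS']
      have hf : List.filter (fun x => decide (x ∉ init ++ [k])) S
          = List.filter (fun x => decide (x ∉ init)) S := by
        apply List.filter_congr
        intro x hx
        have hxk : x ≠ k := fun e => hk (e ▸ hx)
        simp [List.mem_append, hxk]
      rw [hf, List.filter_cons]
      simp [h]

-- A's sort of the (k, k) pairs by first component is the sort of the keys, paired up
theorem sorted_pairs_eq (keys : List Int)
    (h : (PySem.List.sorted keys (fun x => x) false).Pairwise (· < ·)) :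
    PySem.List.sorted (keys.map (fun k => (k, k))) (fun pr : Int × Int => pr.1) false
      = (PySem.List.sorted keys (fun x => x) false).map (fun k => (k, k)) := by
  apply PySem.List.sorted_eq_of_perm_of_pairwise_lt
  · exact List.Perm.map _ (PySem.List.sorted_perm keys (fun x => x) false)
  · exact (List.pairwise_map).mpr h

theorem ordered_candidates_main (source : List (Int × Int)) (preferred : Option Int) :
    ordered_candidates_py source preferred = ordered_candidates_py_alt source preferred := by
  rcases hs : source with _ | ⟨hd, tl⟩
  · cases preferred <;> simp [ordered_candidates_py, ordered_candidates_py_alt, PySem.List.dedup,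
      PySem.List.sorted_eq_nil_iff]
  · rw [← hs]
    have hne : source ≠ [] := by simp [hs]
    set keys := PySem.List.dedup (source.map Prod.fst) with hkeys
    have hnodup : keys.Nodup := PySem.List.nodup_dedup _
    set S := PySem.List.sorted keys (fun x => x) false with hSdef
    have hSnodup : S.Nodup :=
      ((PySem.List.sorted_perm keys (fun x => x) false).nodup_iff).mpr hnodup
    have hmem : ∀ p : Int, p ∈ keys ↔ p ∈ source.map Prod.fst := by
      intro p; exact PySem.List.mem_dedup _ _
    have hlt : S.Pairwise (· < ·) := by
      rw [hSdef, hkeys, PySem.List.dedup_eq_ofList]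
      exact PySem.List.sorted_ofList_pairwise_lt _
    have hfold : ∀ init : List Int,
        (PySem.List.sorted (keys.map (fun k => (k, k))) (fun pr : Int × Int => pr.1) false).foldl
            (fun acc pr => if pr.2 ∈ acc then acc else acc ++ [pr.2]) init
          = init ++ S.filter (fun k => k ∉ init) := by
      intro init
      rw [sorted_pairs_eq keys (hSdef ▸ hlt), List.foldl_map]
      exact foldl_dedup_append S init hSnodup
    unfold ordered_candidates_py ordered_candidates_py_alt
    rw [if_neg hne]
    cases preferred with
    | none =>
      simp only [← hkeys, ← hSdef, hfold []]
      simp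
    | some p =>
      by_cases hp : p ∈ keys
      · simp only [← hkeys, ← hSdef, if_pos hp, hfold [p],
          if_pos ((hmem p).mp hp)]
        simp
      · simp only [← hkeys, ← hSdef, if_neg hp, hfold [],
          if_neg (fun h => hp ((hmem p).mpr h))]
        simp

-- ===== VERDICT (by name: the statement is the Claim_ definition above) =====
theorem ordered_candidates_py_spec : Claim_equal_ordered_candidates_py := by
  intro source preferred _
  exact ordered_candidates_main source preferred
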